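-- pv_equiv track=rewrite | github.com/wiss84/gemma-swarm | agents/supervisor_agent.py | _mark_subtask_done
-- ===== SOURCE A (Python) =====
-- def _mark_subtask_done(task_plan: list, current_subtask: str) -> list:
--     """Mark the most recently completed subtask as done."""
--     # Find first pending subtask whose description matches current_subtask
--     updated = []
--     marked  = False
--     for s in task_plan:
--         if not marked and s["status"] == "pending" and (
--             current_subtask.lower() in s["description"].lower() or
--             s["description"].lower() in current_subtask.lower()
--         ):
--             updated.append({**s, "status": "done"})
--             marked = True
--         else:
--             updated.append(s)
--     # If no match found, mark the first pending one as done
--     if not marked: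
--         for i, s in enumerate(updated):
--             if s["status"] == "pending":
--                 updated[i] = {**s, "status": "done"}
--                 break
--     return updated
-- ===== SOURCE B (Python) =====
-- def _mark_subtask_done(task_plan: list, current_subtask: str) -> list:
--     """Mark the most recently completed subtask as done."""
--     cs = current_subtask.lower()
--     match_i = None
--     pending_i = None
--     # One fused scan: first fuzzy-matching pending subtask, and first pending one.
--     for i, s in enumerate(task_plan):
--         if s["status"] == "pending":
--             if pending_i is None:
--                 pending_i = i
--             d = s["description"].lower()
--             if cs in d or d in cs:
--                 match_i = i
--                 break
--     target = match_i if match_i is not None else pending_i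
--     return [{**s, "status": "done"} if i == target else s
--             for i, s in enumerate(task_plan)]
-- ===== Notes on version B (the rewrite author's own statement) =====
-- stated objective: alternative
-- what changed: B replaces A's flag-threaded copy loop plus a second mutate-in-place pass by one fused scan that computes both the first fuzzy-matching pending index and the first pending index (short-circuiting at a match exactly like A), followed by a single rebuild pass that replaces only the target index.
import Mathlib
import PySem

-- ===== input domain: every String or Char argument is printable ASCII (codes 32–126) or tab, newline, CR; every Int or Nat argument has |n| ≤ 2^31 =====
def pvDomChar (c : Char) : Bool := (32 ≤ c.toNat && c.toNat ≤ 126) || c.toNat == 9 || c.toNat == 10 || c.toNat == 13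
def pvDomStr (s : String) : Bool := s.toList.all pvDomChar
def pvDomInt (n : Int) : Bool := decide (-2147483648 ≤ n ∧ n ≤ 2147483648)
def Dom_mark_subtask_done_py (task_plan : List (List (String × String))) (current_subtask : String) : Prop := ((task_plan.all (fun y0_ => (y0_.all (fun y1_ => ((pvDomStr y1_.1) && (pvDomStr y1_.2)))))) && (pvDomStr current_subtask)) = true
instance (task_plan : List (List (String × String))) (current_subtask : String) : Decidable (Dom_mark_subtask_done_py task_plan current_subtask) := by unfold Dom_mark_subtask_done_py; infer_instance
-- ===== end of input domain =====

-- B replaces A's flag-threaded copy loop plus second mutate-in-place pass by ONE fused scan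
-- (first fuzzy-matching pending index and first pending index) followed by one rebuild pass;
-- same cost, different decomposition (objective: alternative).

-- shared dict helpers (both Pythons do s["key"] and {**s, "status": "done"} on a dict):
-- first-match lookup with default "" — Pre_ guarantees the key is present wherever it is read
def pvGetD (d : List (String × String)) (k : String) : String :=
  match d with
  | [] => ""
  | (k', v) :: r => if k' == k then v else pvGetD r k

-- {**s, "status": "done"}: overwrite in place (a Python dict has the key at most once), else append
def pvSetDone (d : List (String × String)) : List (String × String) :=
  if d.any (fun p => p.1 == "status") then
    d.map (fun p => if p.1 == "status" then ("status", "done") else p)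
  else d ++ [("status", "done")]

-- ===== PORT A =====
-- the first 'for s in task_plan' loop, threading (updated, marked)
def pvLoopA (cs : String) : List (List (String × String)) → Bool → List (List (String × String)) × Bool
  | [], marked => ([], marked)
  | s :: rest, marked =>
    if !marked && (pvGetD s "status" == "pending")
        && (PySem.Str.isIn (PySem.Str.lower cs) (PySem.Str.lower (pvGetD s "description"))
            || PySem.Str.isIn (PySem.Str.lower (pvGetD s "description")) (PySem.Str.lower cs)) then
      let r := pvLoopA cs rest true
      (pvSetDone s :: r.1, r.2)
    else
      let r := pvLoopA cs rest marked
      (s :: r.1, r.2)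

-- the second 'for i, s in enumerate(updated)' loop with break: mark first pending in place
def pvMarkFirstPending : List (List (String × String)) → List (List (String × String))
  | [] => []
  | s :: rest =>
    if pvGetD s "status" == "pending" then pvSetDone s :: rest
    else s :: pvMarkFirstPending rest

def mark_subtask_done_py (task_plan : List (List (String × String))) (current_subtask : String) : List (List (String × String)) :=
  let r := pvLoopA current_subtask task_plan false
  if !r.2 then pvMarkFirstPending r.1 else r.1

-- ===== PORT B =====
-- one fused scan: (index of first fuzzy-matching pending subtask, index of first pending subtask)
def pvScanB (cs : String) : List (List (String × String)) → Int → Option Int → Option Int × Option Int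
  | [], _, pend => (none, pend)
  | s :: rest, i, pend =>
    if pvGetD s "status" == "pending" then
      let pend' := if pend.isNone then some i else pend
      let d := PySem.Str.lower (pvGetD s "description")
      if PySem.Str.isIn cs d || PySem.Str.isIn d cs then (some i, pend')
      else pvScanB cs rest (i + 1) pend'
    else pvScanB cs rest (i + 1) pend

def mark_subtask_done_py_alt (task_plan : List (List (String × String))) (current_subtask : String) : List (List (String × String)) :=
  let cs := PySem.Str.lower current_subtask
  let mp := pvScanB cs task_plan 0 none
  let target := if mp.1.isSome then mp.1 else mp.2
  (PySem.List.enumerate task_plan).map (fun p => if some p.1 == target then pvSetDone p.2 else p.2)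

-- ===== PRECONDITION & SPEC =====
-- Pre_ is exactly the inputs on which Python A returns (no KeyError): every subtask dict that the
-- scan reaches before (or at) the first match must have a "status" key, and a "description" key if
-- its status is "pending"; dicts after the first match are never read.
def Pre_mark_subtask_done_py (task_plan : List (List (String × String))) (current_subtask : String) : Prop :=
  ∀ i, i < task_plan.length →
    ((task_plan.take i).all (fun s =>
        !(((((s.find? (fun p => p.1 == "status")).map (fun p => p.2)).getD "") == "pending")
          && (PySem.Str.isIn (PySem.Str.lower current_subtask)
                (PySem.Str.lower (((s.find? (fun p => p.1 == "description")).map (fun p => p.2)).getD ""))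
              || PySem.Str.isIn
                (PySem.Str.lower (((s.find? (fun p => p.1 == "description")).map (fun p => p.2)).getD ""))
                (PySem.Str.lower current_subtask)))) = true →
      ((task_plan.getD i []).any (fun p => p.1 == "status") = true ∧
       ((((task_plan.getD i []).find? (fun p => p.1 == "status")).map (fun p => p.2)).getD "" = "pending" →
         (task_plan.getD i []).any (fun p => p.1 == "description") = true)))
instance (task_plan : List (List (String × String))) (current_subtask : String) : Decidable (Pre_mark_subtask_done_py task_plan current_subtask) := by unfold Pre_mark_subtask_done_py; infer_instance

def pvWitness_mark_subtask_done_py : (List (List (String × String))) × String :=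
  ([[("status", "pending"), ("description", "fix bug")], [("status", "done"), ("description", "x")]], "Fix")

def Spec_mark_subtask_done_py (task_plan : List (List (String × String))) (current_subtask : String) (out : List (List (String × String))) : Prop := out = mark_subtask_done_py_alt task_plan current_subtask
instance (task_plan : List (List (String × String))) (current_subtask : String) (out : List (List (String × String))) : Decidable (Spec_mark_subtask_done_py task_plan current_subtask out) := by unfold Spec_mark_subtask_done_py; infer_instance

-- ===== CLAIM (what is proved, stated in full; the proofs are below) =====
def Claim_equal_mark_subtask_done_py : Prop := ∀ (task_plan : List (List (String × String))) (current_subtask : String), Dom_mark_subtask_done_py task_plan current_subtask → Pre_mark_subtask_done_py task_plan current_subtask → Spec_mark_subtask_done_py task_plan current_subtask (mark_subtask_done_py task_plan current_subtask)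

-- ===== LEMMAS AND PROOFS =====

-- the shared match condition, with c the already-lowered current_subtask
def pvCondM (c : String) (s : List (String × String)) : Bool :=
  (pvGetD s "status" == "pending")
    && (PySem.Str.isIn c (PySem.Str.lower (pvGetD s "description"))
        || PySem.Str.isIn (PySem.Str.lower (pvGetD s "description")) c)

def pvCondP (s : List (String × String)) : Bool := pvGetD s "status" == "pending"

def pvFuzzy (c : String) (s : List (String × String)) : Bool :=
  PySem.Str.isIn c (PySem.Str.lower (pvGetD s "description"))
    || PySem.Str.isIn (PySem.Str.lower (pvGetD s "description")) c

theorem pvCondM_eq (c : String) (s : List (String × String)) :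
    pvCondM c s = (pvCondP s && pvFuzzy c s) := rfl

-- replace the first element satisfying p (identity if none) — the common normal form
def pvRepl (p : List (String × String) → Bool) : List (List (String × String)) → List (List (String × String))
  | [] => []
  | s :: rest => if p s then pvSetDone s :: rest else s :: pvRepl p rest

-- ---- A-side characterisation ----
theorem pvLoopA_true (cs : String) (l : List (List (String × String))) :
    pvLoopA cs l true = (l, true) := by
  induction l with
  | nil => rfl
  | cons s rest ih => simp [pvLoopA, ih]

theorem pvLoopA_false (cs : String) (l : List (List (String × String))) :
    pvLoopA cs l false =
      if l.any (pvCondM (PySem.Str.lower cs)) then (pvRepl (pvCondM (PySem.Str.lower cs)) l, true)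
      else (l, false) := by
  induction l with
  | nil => rfl
  | cons s rest ih =>
    have e : pvLoopA cs (s :: rest) false =
        if pvCondM (PySem.Str.lower cs) s then
          (pvSetDone s :: (pvLoopA cs rest true).1, (pvLoopA cs rest true).2)
        else (s :: (pvLoopA cs rest false).1, (pvLoopA cs rest false).2) := by
      simp only [pvLoopA, pvCondM, Bool.not_false, Bool.true_and]
      rfl
    rw [e]
    cases hb : pvCondM (PySem.Str.lower cs) s with
    | true => simp [hb, pvLoopA_true, pvRepl, List.any_cons]
    | false =>
      rw [ih]
      cases ha : rest.any (pvCondM (PySem.Str.lower cs)) <;>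
        simp [hb, ha, pvRepl, List.any_cons]

theorem pvMarkFirstPending_eq (l : List (List (String × String))) :
    pvMarkFirstPending l = pvRepl pvCondP l := by
  induction l with
  | nil => rfl
  | cons s rest ih => simp [pvMarkFirstPending, pvRepl, pvCondP, ih]

theorem pvRepl_of_not_any (p : List (String × String) → Bool)
    (l : List (List (String × String))) (h : l.any p = false) : pvRepl p l = l := by
  induction l with
  | nil => rfl
  | cons s rest ih =>
    simp only [List.any_cons, Bool.or_eq_false_iff] at h
    simp [pvRepl, h.1, ih h.2]

theorem markA_eq (tp : List (List (String × String))) (cs : String) :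
    mark_subtask_done_py tp cs =
      if tp.any (pvCondM (PySem.Str.lower cs)) then pvRepl (pvCondM (PySem.Str.lower cs)) tp
      else pvRepl pvCondP tp := by
  unfold mark_subtask_done_py
  rw [pvLoopA_false]
  by_cases h : tp.any (pvCondM (PySem.Str.lower cs)) = true
  · simp [h]
  · simp [Bool.eq_false_iff.mpr h, pvMarkFirstPending_eq]

-- ---- B-side characterisation ----
theorem pvScanB_cons (c : String) (s : List (String × String))
    (rest : List (List (String × String))) (i : Int) (pend : Option Int) :
    pvScanB c (s :: rest) i pend =
      if pvCondP s then
        (if pvFuzzy c s then (some i, if pend.isNone then some i else pend)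
         else pvScanB c rest (i + 1) (if pend.isNone then some i else pend))
      else pvScanB c rest (i + 1) pend := rfl

theorem pvScanB_fst (c : String) (l : List (List (String × String))) (i : Int) (pend : Option Int) :
    (pvScanB c l i pend).1 = (l.findIdx? (pvCondM c)).map (fun k => i + (k : Int)) := by
  induction l generalizing i pend with
  | nil => rfl
  | cons s rest ih =>
    rw [pvScanB_cons, List.findIdx?_cons, pvCondM_eq]
    cases hp : pvCondP s with
    | true =>
      cases hf : pvFuzzy c s with
      | true => simp [hp, hf]
      | false =>
        simp only [hp, hf, Bool.true_and, if_true, if_false, Bool.false_eq_true, ih]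
        cases hfind : rest.findIdx? (pvCondM c) <;> simp [hfind] <;> omega
    | false =>
      simp only [hp, Bool.false_and, if_false, Bool.false_eq_true, ih]
      cases hfind : rest.findIdx? (pvCondM c) <;> simp [hfind] <;> omega

theorem pvScanB_snd (c : String) (l : List (List (String × String))) (i : Int) (pend : Option Int)
    (h : l.any (pvCondM c) = false) :
    (pvScanB c l i pend).2 = pend.or ((l.findIdx? pvCondP).map (fun k => i + (k : Int))) := by
  induction l generalizing i pend with
  | nil => simp [pvScanB]
  | cons s rest ih =>
    simp only [List.any_cons, Bool.or_eq_false_iff] at h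
    rw [pvScanB_cons, List.findIdx?_cons]
    cases hp : pvCondP s with
    | true =>
      have hf : pvFuzzy c s = false := by
        have h1 := h.1
        rw [pvCondM_eq, hp, Bool.true_and] at h1
        exact h1
      simp only [hp, hf, if_true, if_false, Bool.false_eq_true, ih _ _ h.2]
      cases pend <;> simp
    | false =>
      simp only [hp, if_false, Bool.false_eq_true, ih _ _ h.2]
      cases hfind : rest.findIdx? pvCondP <;>
        cases pend <;> simp [hfind] <;> omega

-- a rebuild whose target index is hit by no element leaves the list unchanged
theorem rebuild_of_miss (l : List (List (String × String))) (i : Int) (t : Option Int)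
    (h : ∀ k : Nat, t ≠ some (i + k)) :
    (PySem.List.enumerate l i).map (fun p => if some p.1 == t then pvSetDone p.2 else p.2) = l := by
  induction l generalizing i with
  | nil => simp [PySem.List.enumerate_nil]
  | cons s rest ih =>
    rw [PySem.List.enumerate_cons]
    simp only [List.map_cons]
    have h0 : (some i == t) = false := by
      cases t with
      | none => rfl
      | some j =>
        have h0' := h 0
        simp only [ne_eq, Option.some.injEq] at h0'
        simp only [beq_eq_false_iff_ne, ne_eq, Option.some.injEq]
        omega
    rw [h0]
    simp only [if_false, Bool.false_eq_true]
    rw [ih (i + 1) (fun k => by have := h (k + 1); intro hc; apply this; rw [hc]; congr 1; push_cast; ring)]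

-- a rebuild whose target is the index of the first p-element is pvRepl p
theorem rebuild_of_findIdx (p : List (String × String) → Bool)
    (l : List (List (String × String))) (i : Int) (k : Nat)
    (h : l.findIdx? p = some k) :
    (PySem.List.enumerate l i).map
        (fun q => if some q.1 == some (i + (k : Int)) then pvSetDone q.2 else q.2) = pvRepl p l := by
  induction l generalizing i k with
  | nil => simp [List.findIdx?_nil] at h
  | cons s rest ih =>
    rw [PySem.List.enumerate_cons]
    simp only [List.map_cons, pvRepl]
    rw [List.findIdx?_cons] at h
    by_cases hp : p s = true
    · simp only [hp, if_true] at h ⊢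
      have hk : k = 0 := by simpa using h.symm
      subst hk
      simp only [Nat.cast_zero, add_zero, beq_self_eq_true, if_true]
      rw [rebuild_of_miss rest (i + 1) (some i) (fun m => by simp only [ne_eq, Option.some.injEq]; omega)]
    · simp only [hp, if_false, Bool.false_eq_true] at h ⊢
      cases hf : rest.findIdx? p with
      | none => rw [hf] at h; simp at h
      | some k' =>
        rw [hf] at h
        simp only [Option.map_some, Option.some.injEq] at h
        have hk : k = k' + 1 := by omega
        subst hk
        have h0 : (some i == some (i + ((k' + 1 : Nat) : Int))) = false := by
          simp only [beq_eq_false_iff_ne, ne_eq, Option.some.injEq]; push_cast; omega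
        rw [h0]
        simp only [if_false, Bool.false_eq_true]
        congr 1
        rw [show i + ((k' + 1 : Nat) : Int) = (i + 1) + (k' : Int) by push_cast; ring]
        exact ih (i + 1) k' hf

theorem markB_eq (tp : List (List (String × String))) (cs : String) :
    mark_subtask_done_py_alt tp cs =
      if tp.any (pvCondM (PySem.Str.lower cs)) then pvRepl (pvCondM (PySem.Str.lower cs)) tp
      else pvRepl pvCondP tp := by
  unfold mark_subtask_done_py_alt
  set c := PySem.Str.lower cs with hc
  by_cases h : tp.any (pvCondM c) = true
  · obtain ⟨k, hk⟩ : ∃ k, tp.findIdx? (pvCondM c) = some k := by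
      rcases hf : tp.findIdx? (pvCondM c) with _ | k
      · rw [List.findIdx?_eq_none_iff] at hf
        rw [List.any_eq_true] at h
        obtain ⟨x, hx, hpx⟩ := h
        exact absurd (hf x hx) (by simp [hpx])
      · exact ⟨k, rfl⟩
    simp only [h, if_true]
    have hfst : (pvScanB c tp 0 none).1 = some ((k : Int)) := by
      rw [pvScanB_fst, hk]; simp
    simp only [hfst, Option.isSome_some, if_true]
    have := rebuild_of_findIdx (pvCondM c) tp 0 k hk
    simpa using this
  · have h' : tp.any (pvCondM c) = false := Bool.eq_false_iff.mpr h
    simp only [h', Bool.false_eq_true, if_false]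
    have hfst : (pvScanB c tp 0 none).1 = none := by
      rw [pvScanB_fst]
      rcases hf : tp.findIdx? (pvCondM c) with _ | k
      · simp
      · exfalso
        have := List.findIdx?_eq_some_iff_findIdx_eq.mp hf
        have hmem : tp.any (pvCondM c) = true := by
          rw [List.any_eq_true]
          rcases List.findIdx?_eq_some_iff_getElem.mp hf with ⟨hlt, hget, _⟩
          exact ⟨tp[k], List.getElem_mem hlt, hget⟩
        rw [hmem] at h'; exact absurd h' (by simp)
    simp only [hfst, Option.isSome_none, Bool.false_eq_true, if_false]
    rw [pvScanB_snd c tp 0 none h']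
    rw [Option.none_or]
    rcases hf : tp.findIdx? pvCondP with _ | k
    · simp only [Option.bind_eq_bind, Option.bind_none, Option.map_none]
      refine (rebuild_of_miss tp 0 none (fun m => by simp)).trans ?_
      refine (pvRepl_of_not_any pvCondP tp ?_).symm
      rw [← Bool.not_eq_true, List.any_eq_true]
      rw [List.findIdx?_eq_none_iff] at hf
      rintro ⟨x, hx, hpx⟩
      exact absurd (hf x hx) (by simp [hpx])
    · simp only [Option.bind_eq_bind, Option.bind_some, Option.map_some]
      exact (by simpa using rebuild_of_findIdx pvCondP tp 0 k hf)

-- ===== VERDICT (by name: the statement is the Claim_ definition above) =====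
theorem mark_subtask_done_py_spec : Claim_equal_mark_subtask_done_py := by
  intro tp cs _ _
  unfold Spec_mark_subtask_done_py
  rw [markA_eq, markB_eq]
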